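-- pv_equiv track=rewrite | github.com/michisco/OffensEval_HLT | Library/PreProcessing.py | remove_duplicateUser
-- ===== SOURCE A (Python) =====
-- def remove_duplicateUser(text):
--     """Remove duplicate user tags """
--     count_user = 0
--     res = []
--     for t in text:
--         if t == "@user":
--             if count_user > 0:
--                 t = ''
--             else:
--                 count_user = count_user + 1
--
--         if t != '':
--                 res.append(t)
--     return res
-- ===== SOURCE B (Python) =====
-- def remove_duplicateUser(text):
--     """Remove duplicate user tags """
--     i = text.index("@user") if "@user" in text else None
--     if i is None:
--         return [t for t in text if t != '']
--     head = [t for t in text[:i] if t != '']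
--     tail = [t for t in text[i + 1:] if t != '' and t != '@user']
--     return head + ["@user"] + tail
-- ===== Notes on version B (the rewrite author's own statement) =====
-- stated objective: alternative
-- what changed: Replaces A's stateful running counter over the list with an anchor-index decomposition: find the index of the first '@user', then build the result as filtered-head ++ ['@user'] ++ filtered-tail via slices.
import Mathlib
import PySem

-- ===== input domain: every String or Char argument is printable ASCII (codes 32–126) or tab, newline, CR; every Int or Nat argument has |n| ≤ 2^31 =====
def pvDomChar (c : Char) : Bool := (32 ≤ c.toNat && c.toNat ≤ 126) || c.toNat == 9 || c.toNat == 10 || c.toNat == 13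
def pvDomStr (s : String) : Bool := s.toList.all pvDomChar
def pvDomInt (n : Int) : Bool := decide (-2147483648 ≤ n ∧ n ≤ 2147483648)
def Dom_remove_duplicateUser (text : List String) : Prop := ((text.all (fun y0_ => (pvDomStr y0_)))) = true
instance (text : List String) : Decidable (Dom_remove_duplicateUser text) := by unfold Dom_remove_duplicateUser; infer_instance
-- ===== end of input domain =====

-- B replaces A's stateful running counter by an anchor-index decomposition:
-- find the first "@user", keep head/anchor/tail via slices and filters (objective: alternative).


-- ===== PORT A =====
-- loop body of A: updates (count_user, res) for one token, literally as the Python does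
def pvStepA (s : Int × List String) (t : String) : Int × List String :=
  let tc : String × Int :=
    if t = "@user" then (if s.1 > 0 then ("", s.1) else (t, s.1 + 1)) else (t, s.1)
  if tc.1 ≠ "" then (tc.2, s.2 ++ [tc.1]) else (tc.2, s.2)

def remove_duplicateUser (text : List String) : List String :=
  (text.foldl pvStepA (0, [])).2

-- ===== PORT B =====
def remove_duplicateUser_alt (text : List String) : List String :=
  match PySem.List.index? text "@user" with
  | none => text.filter (fun t => t != "")
  | some i =>
      let head := (PySem.List.slice text none (some (i : Int))).filter (fun t => t != "")
      let tail := (PySem.List.slice text (some ((i : Int) + 1))).filter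
        (fun t => t != "" && t != "@user")
      head ++ ["@user"] ++ tail

-- ===== PRECONDITION & SPEC =====
def Spec_remove_duplicateUser (text : List String) (out : List String) : Prop := out = remove_duplicateUser_alt text
instance (text : List String) (out : List String) : Decidable (Spec_remove_duplicateUser text out) := by unfold Spec_remove_duplicateUser; infer_instance

-- ===== CLAIM (what is proved, stated in full; the proofs are below) =====
def Claim_equal_remove_duplicateUser : Prop := ∀ (text : List String), Dom_remove_duplicateUser text → Spec_remove_duplicateUser text (remove_duplicateUser text)

-- ===== LEMMAS AND PROOFS =====

-- with count_user already positive, every later "@user" is blanked and dropped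
theorem pvFoldA_pos (l : List String) : ∀ (c : Int) (res : List String), 0 < c →
    l.foldl pvStepA (c, res) = (c, res ++ l.filter (fun t => t != "" && t != "@user")) := by
  induction l with
  | nil => intro c res _; simp
  | cons t rest ih =>
    intro c res hc
    by_cases ht : t = "@user"
    · subst ht
      simp [pvStepA, if_pos hc, ih c res hc]
    · by_cases he : t = ""
      · subst he
        simp [pvStepA, ih c res hc]
      · simp [pvStepA, ht, he, ih c (res ++ [t]) hc, bne_iff_ne]

-- before the first "@user", count_user stays 0 and only empty tokens are dropped
theorem pvFoldA_nouser (l : List String) : ∀ (res : List String), "@user" ∉ l →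
    l.foldl pvStepA (0, res) = (0, res ++ l.filter (fun t => t != "")) := by
  induction l with
  | nil => intro res _; simp
  | cons t rest ih =>
    intro res hmem
    have ht : t ≠ "@user" := fun h => hmem (h ▸ List.mem_cons_self ..)
    have hrest : "@user" ∉ rest := fun h => hmem (List.mem_cons_of_mem _ h)
    by_cases he : t = ""
    · subst he
      simp [pvStepA, (by decide : ¬("" = "@user")), ih res hrest]
    · simp [pvStepA, ht, he, ih (res ++ [t]) hrest, bne_iff_ne]

-- ===== VERDICT (by name: the statement is the Claim_ definition above) =====
theorem remove_duplicateUser_spec : Claim_equal_remove_duplicateUser := by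
  intro text _
  unfold Spec_remove_duplicateUser remove_duplicateUser remove_duplicateUser_alt
  cases hix : PySem.List.index? text "@user" with
  | none =>
    have hmem : "@user" ∉ text := (PySem.List.index?_eq_none_iff ..).mp hix
    rw [pvFoldA_nouser text [] hmem]
    simp
  | some i =>
    obtain ⟨pre, suf, htext, hlen, hpre⟩ := (PySem.List.index?_eq_some_iff ..).mp hix
    subst htext
    have h1 : List.foldl pvStepA ((0 : Int), ([] : List String)) (pre ++ "@user" :: suf)
        = (1, (pre.filter (fun t => t != "")) ++ "@user" :: suf.filter (fun t => t != "" && t != "@user")) := by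
      rw [List.foldl_append, pvFoldA_nouser pre [] hpre, List.nil_append]
      show List.foldl pvStepA (pvStepA (0, _) "@user") suf = _
      have hstep : pvStepA ((0 : Int), pre.filter (fun t => t != "")) "@user"
          = (1, pre.filter (fun t => t != "") ++ ["@user"]) := by
        simp [pvStepA]
      rw [hstep, pvFoldA_pos suf 1 _ (by norm_num)]
      simp
    rw [h1]
    have hsl1 : PySem.List.slice (pre ++ "@user" :: suf) none (some (i : Int)) = pre := by
      rw [PySem.List.slice_to _ (by exact_mod_cast Int.natCast_nonneg i)]
      simp [← hlen]
    have hsl2 : PySem.List.slice (pre ++ "@user" :: suf) (some ((i : Int) + 1)) none = suf := by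
      rw [PySem.List.slice_from _ (by omega)]
      have : ((i : Int) + 1).toNat = pre.length + 1 := by omega
      rw [this]
      rw [show pre ++ "@user" :: suf = (pre ++ ["@user"]) ++ suf by simp,
        show pre.length + 1 = (pre ++ ["@user"]).length by simp]
      exact List.drop_left
    simp [hsl1, hsl2]
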